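-- pv_equiv track=rewrite | github.com/Pil0u/adventofcode2020 | day06.py | result
-- ===== SOURCE A (Python) =====
-- def result(input_):
--     groups_p1 = []
--     current_p1 = set()
--
--     groups_p2 = []
--     current_p2 = set('azertyuiopqsdfghjklmwxcvbn')
--
--     for passenger in input_:
--         if passenger == '':
--             groups_p1.append(current_p1)
--             current_p1 = set()
--
--             groups_p2.append(current_p2)
--             current_p2 = set('azertyuiopqsdfghjklmwxcvbn')
--
--             continue
--
--         current_p1 = current_p1.union(set(passenger))
--         current_p2 = current_p2.intersection(set(passenger))
--
--     groups_p1.append(current_p1)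
--     groups_p2.append(current_p2)
--
--     part_one = sum([len(g) for g in groups_p1])
--     part_two = sum([len(g) for g in groups_p2])
--
--     return part_one, part_two
-- ===== SOURCE B (Python) =====
-- ALPHABET = 'azertyuiopqsdfghjklmwxcvbn'  # the 26 letters (module constant of A's file)
--
-- def result(input_):
--     # phase 1: split the input into groups of passenger lines (trailing group always emitted)
--     groups = []
--     current = []
--     for line in input_:
--         if line == '':
--             groups.append(current)
--             current = []
--         else:
--             current.append(line)
--     groups.append(current)
--     # phase 2: per-group set reductions
--     part_one = sum(len(set().union(*map(set, g))) for g in groups)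
--     part_two = sum(len(set(ALPHABET).intersection(*map(set, g))) for g in groups)
--     return part_one, part_two
-- ===== Notes on version B (the rewrite author's own statement) =====
-- stated objective: alternative
-- what changed: B separates the work into two passes: first split the lines into groups, then compute each part as a sum of per-group set reductions (union of the passengers' char sets; intersection seeded with the alphabet), instead of A's single loop threading four running accumulators.
import Mathlib
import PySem

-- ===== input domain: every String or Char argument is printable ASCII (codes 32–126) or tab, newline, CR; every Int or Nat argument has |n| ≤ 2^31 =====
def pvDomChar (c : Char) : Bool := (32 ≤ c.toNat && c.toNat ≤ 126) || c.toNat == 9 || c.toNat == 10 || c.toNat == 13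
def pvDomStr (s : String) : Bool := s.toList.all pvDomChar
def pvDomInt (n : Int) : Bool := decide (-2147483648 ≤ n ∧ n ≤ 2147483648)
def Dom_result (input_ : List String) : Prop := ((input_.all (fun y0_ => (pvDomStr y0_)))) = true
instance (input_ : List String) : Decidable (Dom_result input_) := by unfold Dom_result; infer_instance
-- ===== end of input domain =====

-- B splits the lines into groups first, then sums per-group set reductions,
-- instead of A's single loop threading four running accumulators (same cost; objective: alternative).


-- ===== PORT A =====
-- set('azertyuiopqsdfghjklmwxcvbn')
def pvAlpha : PySem.Set Char := PySem.Set.ofList "azertyuiopqsdfghjklmwxcvbn".toList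

-- A's for-loop: state (groups_p1, current_p1, groups_p2, current_p2); returns the two
-- group lists after the trailing appends.
def resultLoop (xs : List String) (g1 : List (PySem.Set Char)) (c1 : PySem.Set Char)
    (g2 : List (PySem.Set Char)) (c2 : PySem.Set Char) :
    List (PySem.Set Char) × List (PySem.Set Char) :=
  match xs with
  | [] => (g1 ++ [c1], g2 ++ [c2])
  | p :: rest =>
    if p = "" then
      resultLoop rest (g1 ++ [c1]) PySem.Set.empty (g2 ++ [c2]) pvAlpha
    else
      resultLoop rest g1 (PySem.Set.union c1 (PySem.Set.ofList p.toList))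
                      g2 (PySem.Set.inter c2 (PySem.Set.ofList p.toList))

def result (input_ : List String) : Int × Int :=
  let gs := resultLoop input_ [] PySem.Set.empty [] pvAlpha
  let part_one := (gs.1.map (fun g => (PySem.Set.len g : Int))).sum
  let part_two := (gs.2.map (fun g => (PySem.Set.len g : Int))).sum
  (part_one, part_two)

-- ===== PORT B =====
-- phase 1: split into groups (trailing group always emitted)
def splitGroups (xs : List String) (groups : List (List String)) (current : List String) :
    List (List String) :=
  match xs with
  | [] => groups ++ [current]
  | line :: rest =>
    if line = "" then splitGroups rest (groups ++ [current]) []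
    else splitGroups rest groups (current ++ [line])

-- set().union(*map(set, g))
def groupUnion (g : List String) : PySem.Set Char :=
  g.foldl (fun s p => PySem.Set.union s (PySem.Set.ofList p.toList)) PySem.Set.empty

-- set(ALPHABET).intersection(*map(set, g))
def groupInter (g : List String) : PySem.Set Char :=
  g.foldl (fun s p => PySem.Set.inter s (PySem.Set.ofList p.toList)) pvAlpha

def result_alt (input_ : List String) : Int × Int :=
  let groups := splitGroups input_ [] []
  let part_one := (groups.map (fun g => (PySem.Set.len (groupUnion g) : Int))).sum
  let part_two := (groups.map (fun g => (PySem.Set.len (groupInter g) : Int))).sum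
  (part_one, part_two)

-- ===== PRECONDITION & SPEC =====
def Spec_result (input_ : List String) (out : Int × Int) : Prop := out = result_alt input_
instance (input_ : List String) (out : Int × Int) : Decidable (Spec_result input_ out) := by unfold Spec_result; infer_instance

-- ===== CLAIM (what is proved, stated in full; the proofs are below) =====
def Claim_equal_result : Prop := ∀ (input_ : List String), Dom_result input_ → Spec_result input_ (result input_)

-- ===== LEMMAS AND PROOFS =====
set_option maxHeartbeats 1000000
theorem groupUnion_append (g : List String) (p : String) :
    groupUnion (g ++ [p]) = PySem.Set.union (groupUnion g) (PySem.Set.ofList p.toList) := by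
  simp [groupUnion, List.foldl_append]

theorem groupInter_append (g : List String) (p : String) :
    groupInter (g ++ [p]) = PySem.Set.inter (groupInter g) (PySem.Set.ofList p.toList) := by
  simp [groupInter, List.foldl_append]

theorem resultLoop_split (xs : List String) :
    ∀ (acc : List (List String)) (cur : List String),
    resultLoop xs (acc.map groupUnion) (groupUnion cur) (acc.map groupInter) (groupInter cur)
      = ((splitGroups xs acc cur).map groupUnion, (splitGroups xs acc cur).map groupInter) := by
  induction xs with
  | nil => intro acc cur; simp [resultLoop, splitGroups]
  | cons p rest ih =>
    intro acc cur
    by_cases hp : p = ""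
    · have h1 : acc.map groupUnion ++ [groupUnion cur] = (acc ++ [cur]).map groupUnion := by simp
      have h2 : acc.map groupInter ++ [groupInter cur] = (acc ++ [cur]).map groupInter := by simp
      have hu : PySem.Set.empty = groupUnion ([] : List String) := by simp [groupUnion]
      have hi : pvAlpha = groupInter ([] : List String) := by simp [groupInter]
      simp only [resultLoop, splitGroups, hp, if_true]
      rw [h1, h2, hu, hi, ih]
    · simp only [resultLoop, splitGroups, if_neg hp]
      rw [← groupUnion_append, ← groupInter_append, ih]

theorem result_spec : Claim_equal_result := by
  intro input_ _
  unfold Spec_result result result_alt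
  have h := resultLoop_split input_ [] []
  simp only [List.map_nil] at h
  rw [show groupUnion ([] : List String) = PySem.Set.empty from by simp [groupUnion],
      show groupInter ([] : List String) = pvAlpha from by simp [groupInter]] at h
  rw [h]
  simp [List.map_map, Function.comp_def]
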